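-- pv_equiv track=rewrite | github.com/Regin4444/datalog-viewer | app.py | build_group_map
-- ===== SOURCE A (Python) =====
-- def get_channel_group(col_name: str) -> str:
--     c = col_name.lower()
--
--     rules = [
--         ("RPM / Speed", ["rpm", "engine speed", "vehicle speed", "speed"]),
--         ("Boost / Air", [
--             "boost", "map", "charge", "intake", "turbo", "air mass", "mass air",
--             "maf", "manifold", "baro", "pressure", "air pressure"
--         ]),
--         ("Fueling / Lambda", [
--             "lambda", "afr", "fuel", "injection", "injector",
--             "rail pressure", "fuel trim", "trim", "ltft", "stft"
--         ]),
--         ("Ignition", [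
--             "ignition", "spark", "timing", "knock", "retard", "misfire"
--         ]),
--         ("Throttle / Torque / Load", [
--             "throttle", "pedal", "torque", "load", "driver request"
--         ]),
--         ("Temperatures", [
--             "temp", "temperature", "coolant", "oil", "iat", "egt", "catalyst"
--         ]),
--         ("Cam / VVT", [
--             "cam", "vvt", "valve", "phaser"
--         ]),
--         ("Transmission / Drivetrain", [
--             "gear", "clutch", "transmission", "drivetrain"
--         ]),
--         ("Electrical", [
--             "voltage", "battery", "current", "alternator"
--         ]),
--         ("Diagnostics / Status", [
--             "status", "state", "mode", "error", "fault", "counter", "flag"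
--         ]),
--     ]
--
--     for group_name, keywords in rules:
--         if any(keyword in c for keyword in keywords):
--             return group_name
--
--     return "Other"
--
-- def build_group_map(columns):
--     group_map = {}
--     for col in columns:
--         group = get_channel_group(col)
--         group_map.setdefault(group, []).append(col)
--
--     for group in group_map:
--         group_map[group] = sorted(group_map[group])
--
--     return dict(sorted(group_map.items(), key=lambda x: x[0]))
-- ===== SOURCE B (Python) =====
-- # One flat (keyword, group) table scanned once per column, then a single global
-- # sort of (group, col) pairs and a linear group-by pass; dict built once at the end.
-- _RULES = [
--     ("RPM / Speed", ["rpm", "engine speed", "vehicle speed", "speed"]),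
--     ("Boost / Air", [
--         "boost", "map", "charge", "intake", "turbo", "air mass", "mass air",
--         "maf", "manifold", "baro", "pressure", "air pressure"
--     ]),
--     ("Fueling / Lambda", [
--         "lambda", "afr", "fuel", "injection", "injector",
--         "rail pressure", "fuel trim", "trim", "ltft", "stft"
--     ]),
--     ("Ignition", [
--         "ignition", "spark", "timing", "knock", "retard", "misfire"
--     ]),
--     ("Throttle / Torque / Load", [
--         "throttle", "pedal", "torque", "load", "driver request"
--     ]),
--     ("Temperatures", [
--         "temp", "temperature", "coolant", "oil", "iat", "egt", "catalyst"
--     ]),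
--     ("Cam / VVT", [
--         "cam", "vvt", "valve", "phaser"
--     ]),
--     ("Transmission / Drivetrain", [
--         "gear", "clutch", "transmission", "drivetrain"
--     ]),
--     ("Electrical", [
--         "voltage", "battery", "current", "alternator"
--     ]),
--     ("Diagnostics / Status", [
--         "status", "state", "mode", "error", "fault", "counter", "flag"
--     ]),
-- ]
--
-- # flattened: first matching keyword in this list gives the group, which equals
-- # "first rule with any matching keyword" because rule order is preserved.
-- _KEYWORD_TABLE = [(kw, grp) for grp, kws in _RULES for kw in kws]
--
--
-- def _classify(col):
--     c = col.lower()
--     for kw, grp in _KEYWORD_TABLE: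
--         if kw in c:
--             return grp
--     return "Other"
--
--
-- def build_group_map(columns):
--     pairs = sorted((_classify(c), c) for c in columns)
--     groups = []
--     for grp, col in pairs:
--         if groups and groups[-1][0] == grp:
--             groups[-1][1].append(col)
--         else:
--             groups.append((grp, [col]))
--     return dict(groups)
-- ===== Notes on version B (the rewrite author's own statement) =====
-- stated objective: alternative
-- what changed: Replaced A's nested rule-table classifier and its setdefault-append dict accumulation followed by an in-place per-group sort and a final sort of the dict items with a flat (keyword, group) table scanned once per column, ONE global sort of all (group, col) pairs under the lexicographic tuple key, and a single linear group-by pass that builds the result directly.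
import Mathlib
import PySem

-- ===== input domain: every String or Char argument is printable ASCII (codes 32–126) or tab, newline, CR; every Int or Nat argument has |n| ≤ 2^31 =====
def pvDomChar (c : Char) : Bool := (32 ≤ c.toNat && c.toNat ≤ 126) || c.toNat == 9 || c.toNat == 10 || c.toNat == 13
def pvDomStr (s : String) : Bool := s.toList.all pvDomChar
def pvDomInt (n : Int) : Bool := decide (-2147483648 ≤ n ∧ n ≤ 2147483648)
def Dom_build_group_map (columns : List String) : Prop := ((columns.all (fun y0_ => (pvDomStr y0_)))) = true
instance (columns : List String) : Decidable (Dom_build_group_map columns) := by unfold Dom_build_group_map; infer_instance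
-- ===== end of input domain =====

-- B replaces A's nested rule-table classifier + setdefault-dict accumulation + per-group sort +
-- final items sort with a flat keyword table, ONE global sort of (group, col) pairs and a
-- linear group-by pass (objective: alternative; measured faster by a constant factor).

-- ===== PORT A =====
-- A's helper: the nested rule-table classifier
def get_channel_group (col_name : String) : String :=
  let c := PySem.Str.lower col_name
  let rules : List (String × List String) := [
    ("RPM / Speed", ["rpm", "engine speed", "vehicle speed", "speed"]),
    ("Boost / Air", ["boost", "map", "charge", "intake", "turbo", "air mass", "mass air",
        "maf", "manifold", "baro", "pressure", "air pressure"]),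
    ("Fueling / Lambda", ["lambda", "afr", "fuel", "injection", "injector",
        "rail pressure", "fuel trim", "trim", "ltft", "stft"]),
    ("Ignition", ["ignition", "spark", "timing", "knock", "retard", "misfire"]),
    ("Throttle / Torque / Load", ["throttle", "pedal", "torque", "load", "driver request"]),
    ("Temperatures", ["temp", "temperature", "coolant", "oil", "iat", "egt", "catalyst"]),
    ("Cam / VVT", ["cam", "vvt", "valve", "phaser"]),
    ("Transmission / Drivetrain", ["gear", "clutch", "transmission", "drivetrain"]),
    ("Electrical", ["voltage", "battery", "current", "alternator"]),
    ("Diagnostics / Status", ["status", "state", "mode", "error", "fault", "counter", "flag"])]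
  -- 'for group_name, keywords in rules: if any(keyword in c …): return group_name' = first match
  match rules.find? (fun r => r.2.any (fun kw => PySem.Str.isIn kw c)) with
  | some r => r.1
  | none => "Other"

def build_group_map (columns : List String) : List (String × List String) :=
  -- group_map = {}; for col in columns: group_map.setdefault(group, []).append(col)
  let d := columns.foldl
    (fun d col => d.modify (get_channel_group col) [] (fun l => l ++ [col])) PySem.Dict.empty
  -- for group in group_map: group_map[group] = sorted(group_map[group])
  let d2 := d.keys.foldl
    (fun d2 g => d2.insert g (PySem.List.sorted (d2.getD g []) (fun x => x))) d
  -- return dict(sorted(group_map.items(), key=lambda x: x[0]))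
  (PySem.Dict.ofList (PySem.List.sorted d2.items (fun x => x.1))).items

-- ===== PORT B =====
-- B's flat (keyword, group) table _KEYWORD_TABLE
def pvKeywordTable : List (String × String) := [
  ("rpm", "RPM / Speed"),
  ("engine speed", "RPM / Speed"),
  ("vehicle speed", "RPM / Speed"),
  ("speed", "RPM / Speed"),
  ("boost", "Boost / Air"),
  ("map", "Boost / Air"),
  ("charge", "Boost / Air"),
  ("intake", "Boost / Air"),
  ("turbo", "Boost / Air"),
  ("air mass", "Boost / Air"),
  ("mass air", "Boost / Air"),
  ("maf", "Boost / Air"),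
  ("manifold", "Boost / Air"),
  ("baro", "Boost / Air"),
  ("pressure", "Boost / Air"),
  ("air pressure", "Boost / Air"),
  ("lambda", "Fueling / Lambda"),
  ("afr", "Fueling / Lambda"),
  ("fuel", "Fueling / Lambda"),
  ("injection", "Fueling / Lambda"),
  ("injector", "Fueling / Lambda"),
  ("rail pressure", "Fueling / Lambda"),
  ("fuel trim", "Fueling / Lambda"),
  ("trim", "Fueling / Lambda"),
  ("ltft", "Fueling / Lambda"),
  ("stft", "Fueling / Lambda"),
  ("ignition", "Ignition"),
  ("spark", "Ignition"),
  ("timing", "Ignition"),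
  ("knock", "Ignition"),
  ("retard", "Ignition"),
  ("misfire", "Ignition"),
  ("throttle", "Throttle / Torque / Load"),
  ("pedal", "Throttle / Torque / Load"),
  ("torque", "Throttle / Torque / Load"),
  ("load", "Throttle / Torque / Load"),
  ("driver request", "Throttle / Torque / Load"),
  ("temp", "Temperatures"),
  ("temperature", "Temperatures"),
  ("coolant", "Temperatures"),
  ("oil", "Temperatures"),
  ("iat", "Temperatures"),
  ("egt", "Temperatures"),
  ("catalyst", "Temperatures"),
  ("cam", "Cam / VVT"),
  ("vvt", "Cam / VVT"),
  ("valve", "Cam / VVT"),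
  ("phaser", "Cam / VVT"),
  ("gear", "Transmission / Drivetrain"),
  ("clutch", "Transmission / Drivetrain"),
  ("transmission", "Transmission / Drivetrain"),
  ("drivetrain", "Transmission / Drivetrain"),
  ("voltage", "Electrical"),
  ("battery", "Electrical"),
  ("current", "Electrical"),
  ("alternator", "Electrical"),
  ("status", "Diagnostics / Status"),
  ("state", "Diagnostics / Status"),
  ("mode", "Diagnostics / Status"),
  ("error", "Diagnostics / Status"),
  ("fault", "Diagnostics / Status"),
  ("counter", "Diagnostics / Status"),
  ("flag", "Diagnostics / Status")]

-- B's helper _classify: 'for kw, grp in _KEYWORD_TABLE: if kw in c: return grp' = first match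
def classify_alt (col : String) : String :=
  let c := PySem.Str.lower col
  match pvKeywordTable.find? (fun p => PySem.Str.isIn p.1 c) with
  | some p => p.2
  | none => "Other"

def build_group_map_alt (columns : List String) : List (String × List String) :=
  -- pairs = sorted((_classify(c), c) for c in columns)   (tuple key = lexicographic)
  let pairs := PySem.List.sorted2 (columns.map (fun c => (classify_alt c, c)))
      (fun p => p.1) (fun p => p.2)
  -- the group-by loop over the sorted pairs
  let groups := pairs.foldl (fun acc p =>
      match acc.getLast? with
      | some last => if last.1 == p.1
          then acc.dropLast ++ [(p.1, last.2 ++ [p.2])]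
          else acc ++ [(p.1, [p.2])]
      | none => acc ++ [(p.1, [p.2])]) []
  -- return dict(groups)
  (PySem.Dict.ofList groups).items

-- ===== PRECONDITION & SPEC =====
def Spec_build_group_map (columns : List String) (out : List (String × List String)) : Prop := out = build_group_map_alt columns
instance (columns : List String) (out : List (String × List String)) : Decidable (Spec_build_group_map columns out) := by unfold Spec_build_group_map; infer_instance

-- ===== CLAIM (what is proved, stated in full; the proofs are below) =====
def Claim_equal_build_group_map : Prop := ∀ (columns : List String), Dom_build_group_map columns → Spec_build_group_map columns (build_group_map columns)

-- ===== LEMMAS AND PROOFS =====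

-- the common canonical form both programs are reduced to:
-- alphabetically sorted distinct groups, each with the sorted filter of its columns
def sortedGroups (columns : List String) : List String :=
  PySem.List.sorted (PySem.Set.ofList (columns.map get_channel_group)) (fun x => x)

def colsOf (columns : List String) (g : String) : List String :=
  PySem.List.sorted (columns.filter (fun c => get_channel_group c == g)) (fun x => x)

def canon (columns : List String) : List (String × List String) :=
  (sortedGroups columns).map (fun g => (g, colsOf columns g))

-- ---------- A-side: build_group_map = canon ----------

-- proof-local names for A's two folds
def groupDict (columns : List String) : PySem.Dict String (List String) :=
  columns.foldl
    (fun d col => d.modify (get_channel_group col) [] (fun l => l ++ [col])) PySem.Dict.empty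

def sortedDict (columns : List String) : PySem.Dict String (List String) :=
  (groupDict columns).keys.foldl
    (fun d2 g => d2.insert g (PySem.List.sorted (d2.getD g []) (fun x => x))) (groupDict columns)

-- step 1 of A: the setdefault/append loop groups the columns: value at key k is the filter.
theorem getD_groupFold (columns : List String) (k : String) :
    (groupDict columns).getD k []
    = columns.filter (fun col => get_channel_group col == k) := by
  have h := PySem.Dict.getD_foldl_modify_append
      (columns.map (fun col => ((get_channel_group col), col)))
      (PySem.Dict.empty (κ := String) (ν := List String)) k
  rw [List.foldl_map] at h
  rw [groupDict, h]
  simp [List.filter_map, List.map_map, Function.comp_def]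

theorem keys_groupFold (columns : List String) :
    (groupDict columns).keys = PySem.Set.ofList (columns.map get_channel_group) := by
  have h := PySem.Dict.keys_foldl_modify_key columns get_channel_group
      ([] : List String) (fun _ col l => l ++ [col])
      (PySem.Dict.empty (κ := String) (ν := List String))
  rw [groupDict]
  simpa [PySem.Dict.keys_empty, PySem.Set.update_nil_left] using h

-- step 2 of A: the per-key sorting loop, lookup after the fold.
theorem getD_sortFold (ks : List String) (d : PySem.Dict String (List String)) (k : String)
    (hnd : ks.Nodup) :
    (ks.foldl (fun d2 g => d2.insert g (PySem.List.sorted (d2.getD g []) (fun x => x))) d).getD k []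
    = if k ∈ ks then PySem.List.sorted (d.getD k []) (fun x => x) else d.getD k [] := by
  induction ks generalizing d with
  | nil => simp
  | cons j t ih =>
    have hnt : t.Nodup := (List.nodup_cons.mp hnd).2
    have hjt : j ∉ t := (List.nodup_cons.mp hnd).1
    simp only [List.foldl_cons]
    rw [ih _ hnt]
    by_cases hk : k ∈ t
    · have hkj : k ≠ j := fun h => hjt (h ▸ hk)
      rw [PySem.Dict.getD_insert]
      simp [hk, hkj, List.mem_cons]
    · by_cases hj : k = j
      · subst hj
        simp [hk]
      · simp [hk, hj, PySem.Dict.getD_insert]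

theorem keys_sortFold (d : PySem.Dict String (List String)) :
    (d.keys.foldl (fun d2 g => d2.insert g (PySem.List.sorted (d2.getD g []) (fun x => x))) d).keys
    = d.keys := by
  rw [PySem.Dict.keys_foldl_insert, PySem.Set.update_eq_append_filter]
  rw [List.filter_eq_nil_iff.mpr ?_]
  · simp
  · intro a ha
    simp
    exact (PySem.Set.mem_ofList _ _).mp ha

theorem items_sortedDict (columns : List String) :
    (sortedDict columns).items
    = (PySem.Set.ofList (columns.map get_channel_group)).map
        (fun k => (k, colsOf columns k)) := by
  have hKnd : (PySem.Set.ofList (columns.map get_channel_group)).Nodup :=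
    PySem.Set.nodup_ofList _
  have hkeys2 : (sortedDict columns).keys = PySem.Set.ofList (columns.map get_channel_group) := by
    rw [sortedDict, keys_sortFold, keys_groupFold]
  have hnd2 : (sortedDict columns).keys.Nodup := by rw [hkeys2]; exact hKnd
  rw [PySem.Dict.items_eq_map_keys _ hnd2 [], hkeys2]
  refine List.map_congr_left (fun k hk => ?_)
  have : (sortedDict columns).getD k []
      = PySem.List.sorted ((groupDict columns).getD k []) (fun x => x) := by
    rw [sortedDict, getD_sortFold _ _ _ (by rw [keys_groupFold]; exact hKnd)]
    rw [keys_groupFold]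
    simp [hk]
  rw [this, getD_groupFold, colsOf]

theorem A_canon (columns : List String) : build_group_map columns = canon columns := by
  have hA : build_group_map columns
      = (PySem.Dict.ofList (PySem.List.sorted (sortedDict columns).items (fun x => x.1))).items :=
    rfl
  rw [hA]
  have hp := PySem.List.sorted_ofList_pairwise_lt (columns.map get_channel_group)
  have hsorted : PySem.List.sorted (sortedDict columns).items (fun x => x.1)
      = canon columns := by
    apply PySem.List.sorted_eq_of_perm_of_pairwise_lt
    · rw [items_sortedDict]
      exact (PySem.List.sorted_perm _ (fun x => x) false).map _
    · exact (List.pairwise_map).mpr hp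
  rw [hsorted]
  have hndk : ((canon columns).map Prod.fst).Nodup := by
    rw [canon, List.map_map]
    simpa [Function.comp_def, sortedGroups] using hp.nodup
  rw [PySem.Dict.ofList, PySem.Dict.update]
  rw [PySem.Dict.items_foldl_insert_fresh _ Prod.fst Prod.snd _
        (fun a _ => PySem.Dict.contains_empty _) hndk]
  simp [PySem.Dict.empty]

-- ---------- B-side: the two classifiers agree ----------

-- A's rule table as a named list (the same literal)
def pvRules : List (String × List String) := [
    ("RPM / Speed", ["rpm", "engine speed", "vehicle speed", "speed"]),
    ("Boost / Air", ["boost", "map", "charge", "intake", "turbo", "air mass", "mass air",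
        "maf", "manifold", "baro", "pressure", "air pressure"]),
    ("Fueling / Lambda", ["lambda", "afr", "fuel", "injection", "injector",
        "rail pressure", "fuel trim", "trim", "ltft", "stft"]),
    ("Ignition", ["ignition", "spark", "timing", "knock", "retard", "misfire"]),
    ("Throttle / Torque / Load", ["throttle", "pedal", "torque", "load", "driver request"]),
    ("Temperatures", ["temp", "temperature", "coolant", "oil", "iat", "egt", "catalyst"]),
    ("Cam / VVT", ["cam", "vvt", "valve", "phaser"]),
    ("Transmission / Drivetrain", ["gear", "clutch", "transmission", "drivetrain"]),
    ("Electrical", ["voltage", "battery", "current", "alternator"]),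
    ("Diagnostics / Status", ["status", "state", "mode", "error", "fault", "counter", "flag"])]

-- first match in the flattened (keyword, group) table = first rule with any matching keyword
theorem flat_find (pred : String → Bool) (rules : List (String × List String)) :
    ((rules.flatMap (fun r => r.2.map (fun kw => (kw, r.1)))).find?
        (fun p => pred p.1)).map Prod.snd
    = (rules.find? (fun r => r.2.any pred)).map Prod.fst := by
  induction rules with
  | nil => simp
  | cons r t ih =>
    rw [List.flatMap_cons, List.find?_append, List.find?_map]
    by_cases h : r.2.any pred = true
    · obtain ⟨kw, hkw, hpred⟩ := List.any_eq_true.mp h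
      obtain ⟨kw', hfind⟩ := Option.isSome_iff_exists.mp
        ((List.find?_isSome).mpr ⟨kw, hkw, hpred⟩)
      simp [h, hfind, Function.comp_def]
    · have hfind : List.find? ((fun p => pred p.1) ∘ fun kw => (kw, r.1)) r.2 = none := by
        rw [List.find?_eq_none]
        intro x hx
        exact fun hp => h (List.any_eq_true.mpr ⟨x, hx, by simpa using hp⟩)
      rw [hfind, List.find?_cons_of_neg (by simpa using h)]
      simpa using ih

theorem classify_eq (col : String) : classify_alt col = get_channel_group col := by
  have hT : pvKeywordTable = pvRules.flatMap (fun r => r.2.map (fun kw => (kw, r.1))) := by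
    rfl
  have h := flat_find (fun kw => PySem.Str.isIn kw (PySem.Str.lower col)) pvRules
  rw [← hT] at h
  show (match pvKeywordTable.find? (fun p => PySem.Str.isIn p.1 (PySem.Str.lower col)) with
        | some p => p.2 | none => "Other")
     = (match pvRules.find? (fun r => r.2.any (fun kw => PySem.Str.isIn kw (PySem.Str.lower col))) with
        | some r => r.1 | none => "Other")
  cases hf : pvKeywordTable.find? (fun p => PySem.Str.isIn p.1 (PySem.Str.lower col)) with
  | none =>
    rw [hf] at h
    cases hr : pvRules.find? (fun r => r.2.any (fun kw => PySem.Str.isIn kw (PySem.Str.lower col))) with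
    | none => rfl
    | some r => rw [hr] at h; simp at h
  | some p =>
    rw [hf] at h
    cases hr : pvRules.find? (fun r => r.2.any (fun kw => PySem.Str.isIn kw (PySem.Str.lower col))) with
    | none => rw [hr] at h; simp at h
    | some r =>
      rw [hr] at h
      simpa using h

-- ---------- B-side: the global pair sort is the flatMap of per-group blocks ----------

def tagged (columns : List String) : List (String × String) :=
  columns.map (fun c => (get_channel_group c, c))

def flatPairs (columns : List String) : List (String × String) :=
  (sortedGroups columns).flatMap (fun g => (colsOf columns g).map (fun c => (g, c)))

-- sorting pairs with the tuple key (fst, snd) = sorting with the lexicographic key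
theorem sorted2_eq_sorted_lex (xs : List (String × String)) :
    PySem.List.sorted2 xs (fun p => p.1) (fun p => p.2)
    = PySem.List.sorted xs (fun p => toLex p) := by
  have hbe : ∀ (a b : String × String),
      (decide (a.1 < b.1) || (!decide (b.1 < a.1) && decide (a.2 < b.2)))
      = decide (toLex a < toLex b) := by
    intro a b
    by_cases h1 : a.1 < b.1
    · simp [h1, Prod.Lex.lt_iff]
    · by_cases h2 : b.1 < a.1
      · have hne : ¬ (a.1 = b.1) := fun he => absurd (he ▸ h2) (lt_irrefl _)
        simp [h2, Prod.Lex.lt_iff, hne, asymm h2]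
      · have he : a.1 = b.1 := le_antisymm (not_lt.mp h2) (not_lt.mp h1)
        simp [Prod.Lex.lt_iff, he]
  rw [PySem.List.sorted_eq_foldl_insertBy]
  simp only [PySem.List.sorted2]
  congr 1
  funext acc x
  congr 1
  funext a b
  exact hbe a b

-- the tagged pairs of one group are exactly that group's filtered columns
theorem filter_tagged (columns : List String) (g : String) :
    (tagged columns).filter (fun p => p.1 == g)
    = (columns.filter (fun c => get_channel_group c == g)).map (fun c => (g, c)) := by
  rw [tagged, List.filter_map]
  refine List.map_congr_left (fun c hc => ?_)
  have : get_channel_group c = g := by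
    have := List.of_mem_filter hc
    simpa using this
  simp [this]

-- distinct groups' filter blocks are a permutation of the whole list
theorem perm_flatMap_filter (gs : List String) (l : List (String × String))
    (hnd : gs.Nodup) (hcov : ∀ p ∈ l, p.1 ∈ gs) :
    (gs.flatMap (fun g => l.filter (fun p => p.1 == g))).Perm l := by
  induction gs generalizing l with
  | nil =>
    have : l = [] := by
      cases l with
      | nil => rfl
      | cons p t => exact absurd (hcov p (List.mem_cons_self)) (List.not_mem_nil)
    simp [this]
  | cons g t ih =>
    rw [List.flatMap_cons]
    have hrest : ∀ g' ∈ t, l.filter (fun p => p.1 == g')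
        = (l.filter (fun p => !(p.1 == g))).filter (fun p => p.1 == g') := by
      intro g' hg'
      have hne : g ≠ g' := fun he => (List.nodup_cons.mp hnd).1 (he ▸ hg')
      rw [List.filter_filter]
      refine (List.filter_congr (fun p _ => ?_)).symm
      by_cases hp : p.1 == g'
      · have : ¬ (p.1 == g) = true := by
          intro hpg
          exact hne ((eq_of_beq hpg).symm.trans (eq_of_beq hp))
        simp [hp, this]
      · simp [hp]
    have hflat : t.flatMap (fun g' => l.filter (fun p => p.1 == g'))
        = t.flatMap (fun g' => (l.filter (fun p => !(p.1 == g))).filter (fun p => p.1 == g')) :=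
      List.flatMap_congr (fun g' hg' => hrest g' hg')
    rw [hflat]
    have hperm := ih (l.filter (fun p => !(p.1 == g))) (List.nodup_cons.mp hnd).2 ?_
    · have h2 : (l.filter (fun p => p.1 == g) ++ l.filter (fun p => !(p.1 == g))).Perm l :=
        List.filter_append_perm _ l
      exact (hperm.append_left _).trans h2
    · intro p hp
      have hmem := List.mem_of_mem_filter hp
      have hne := List.of_mem_filter hp
      have : p.1 ∈ g :: t := hcov p hmem
      rcases List.mem_cons.mp this with he | ht
      · simp [he] at hne
      · exact ht

theorem sorted_tagged (columns : List String) :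
    PySem.List.sorted (tagged columns) (fun p => toLex p) = flatPairs columns := by
  have hp := PySem.List.sorted_ofList_pairwise_lt (columns.map get_channel_group)
  apply PySem.List.eq_of_perm_of_pairwise_le_of_injective (fun p => toLex p)
      (fun a b h => by simpa using h)
  · -- permutation: both sides ~ tagged columns
    refine (PySem.List.sorted_perm _ _ _).trans (List.Perm.symm ?_)
    have hcov : ∀ p ∈ tagged columns, p.1 ∈ sortedGroups columns := by
      intro p hp'
      obtain ⟨c, hc, he⟩ := List.mem_map.mp hp'
      rw [sortedGroups, PySem.List.mem_sorted, PySem.Set.mem_ofList, ← he]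
      exact List.mem_map_of_mem hc
    have h1 := perm_flatMap_filter (sortedGroups columns) (tagged columns) hp.nodup hcov
    refine List.Perm.trans ?_ h1
    rw [flatPairs]
    apply List.Perm.flatMap_left
    intro g _
    rw [filter_tagged]
    exact ((PySem.List.sorted_perm _ _ _).map _)
  · exact PySem.List.sorted_pairwise _ _
  · -- flatPairs is lex-pairwise-≤
    rw [flatPairs, List.pairwise_flatMap]
    constructor
    · intro g _
      rw [List.pairwise_map]
      have := PySem.List.sorted_pairwise (columns.filter (fun c => get_channel_group c == g))
        (fun x => x)
      refine this.imp (fun h => ?_)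
      rw [Prod.Lex.le_iff]
      exact Or.inr ⟨rfl, h⟩
    · refine hp.imp ?_
      intro g1 g2 hlt x hx y hy
      obtain ⟨c1, _, he1⟩ := List.mem_map.mp hx
      obtain ⟨c2, _, he2⟩ := List.mem_map.mp hy
      rw [← he1, ← he2]
      rw [Prod.Lex.le_iff]
      exact Or.inl hlt

-- ---------- B-side: the group-by fold over block-shaped input ----------

def gstep (acc : List (String × List String)) (p : String × String) :
    List (String × List String) :=
  match acc.getLast? with
  | some last => if last.1 == p.1
      then acc.dropLast ++ [(p.1, last.2 ++ [p.2])]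
      else acc ++ [(p.1, [p.2])]
  | none => acc ++ [(p.1, [p.2])]

theorem gstep_same (init : List (String × List String)) (g : String) (v : List String)
    (c : String) :
    gstep (init ++ [(g, v)]) (g, c) = init ++ [(g, v ++ [c])] := by
  simp [gstep]

theorem gfold_block (cs : List String) (init : List (String × List String))
    (g : String) (v : List String) :
    (cs.map (fun c => (g, c))).foldl gstep (init ++ [(g, v)]) = init ++ [(g, v ++ cs)] := by
  induction cs generalizing v with
  | nil => simp
  | cons c t ih =>
    rw [List.map_cons, List.foldl_cons, gstep_same, ih]
    simp

theorem gfold_flat (gs : List String) (vs : String → List String)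
    (acc : List (String × List String))
    (hne : ∀ g ∈ gs, vs g ≠ [])
    (hpw : gs.Pairwise (· ≠ ·))
    (hlast : ∀ last, acc.getLast? = some last → ∀ g ∈ gs, last.1 ≠ g) :
    (gs.flatMap (fun g => (vs g).map (fun c => (g, c)))).foldl gstep acc
    = acc ++ gs.map (fun g => (g, vs g)) := by
  induction gs generalizing acc with
  | nil => simp
  | cons g t ih =>
    rw [List.flatMap_cons, List.foldl_append]
    obtain ⟨c, cs, hvg⟩ : ∃ c cs, vs g = c :: cs := by
      cases hv : vs g with
      | nil => exact absurd hv (hne g List.mem_cons_self)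
      | cons c cs => exact ⟨c, cs, rfl⟩
    rw [hvg, List.map_cons, List.foldl_cons]
    have hstep : gstep acc (g, c) = acc ++ [(g, [c])] := by
      cases hl : acc.getLast? with
      | none => simp [gstep, hl]
      | some last =>
        have hne' : ¬ (last.1 == g) = true := by
          simpa using hlast last hl g List.mem_cons_self
        simp [gstep, hl, hne']
    rw [hstep, gfold_block]
    rw [ih _ (fun g' hg' => hne g' (List.mem_cons_of_mem _ hg'))
        (List.pairwise_cons.mp hpw).2 ?_]
    · simp [hvg]
    · intro last hl g' hg'
      rw [List.getLast?_concat] at hl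
      cases hl
      exact (List.pairwise_cons.mp hpw).1 g' hg'

-- ---------- assembling B ----------

theorem B_canon (columns : List String) : build_group_map_alt columns = canon columns := by
  have htag : columns.map (fun c => (classify_alt c, c)) = tagged columns :=
    List.map_congr_left (fun c _ => by rw [classify_eq])
  have hp := PySem.List.sorted_ofList_pairwise_lt (columns.map get_channel_group)
  have hB : build_group_map_alt columns
      = (PySem.Dict.ofList ((PySem.List.sorted2 (columns.map (fun c => (classify_alt c, c)))
          (fun p => p.1) (fun p => p.2)).foldl gstep [])).items := rfl
  have hp' : (sortedGroups columns).Pairwise (· < ·) := hp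
  rw [hB, htag, sorted2_eq_sorted_lex, sorted_tagged, flatPairs]
  rw [gfold_flat (sortedGroups columns) (colsOf columns) [] ?_ (hp'.imp ne_of_lt)
    (by intro last hl; simp at hl)]
  · show (PySem.Dict.ofList (canon columns)).items = canon columns
    have hndk : ((canon columns).map Prod.fst).Nodup := by
      rw [canon, List.map_map]
      simpa [Function.comp_def, sortedGroups] using hp.nodup
    rw [PySem.Dict.ofList, PySem.Dict.update]
    rw [PySem.Dict.items_foldl_insert_fresh _ Prod.fst Prod.snd _
          (fun a _ => PySem.Dict.contains_empty _) hndk]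
    simp [PySem.Dict.empty]
  · intro g hg
    rw [colsOf, Ne, PySem.List.sorted_eq_nil_iff]
    rw [sortedGroups, PySem.List.mem_sorted, PySem.Set.mem_ofList] at hg
    obtain ⟨c, hc, he⟩ := List.mem_map.mp hg
    intro hnil
    have hmem : c ∈ columns.filter (fun c => get_channel_group c == g) :=
      List.mem_filter.mpr ⟨hc, by simp [he]⟩
    simp [hnil] at hmem

-- ===== VERDICT (by name: the statement is the Claim_ definition above) =====
theorem build_group_map_spec : Claim_equal_build_group_map := by
  intro columns _
  unfold Spec_build_group_map
  rw [A_canon, B_canon]
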